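-- pv_equiv track=rewrite | github.com/pollyyao/CodingBatSolution-Python | String-2/cat_dog.py | cat_dog
-- ===== SOURCE A (Python) =====
-- def cat_dog(str):
--   catCount=0
--   dogCount=0
--
--   for i in range(len(str)-2):
--     if str[i:i+3]=="cat":
--       catCount = catCount + 1
--     else:
--       if str[i:i+3] =="dog":
--         dogCount = dogCount+1
--       else:
--         continue
--
--   return catCount == dogCount
-- ===== SOURCE B (Python) =====
-- def cat_dog(str):
--   bal = 0
--   p2 = None
--   p1 = None
--   for c in str:
--     if p2 == 'c' and p1 == 'a' and c == 't':
--       bal = bal + 1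
--     elif p2 == 'd' and p1 == 'o' and c == 'g':
--       bal = bal - 1
--     p2, p1 = p1, c
--   return bal == 0
-- ===== Notes on version B (the rewrite author's own statement) =====
-- stated objective: faster
-- what changed: Replaced A's indexed loop that allocates a 3-character slice per position and keeps two counters with a single character-streaming pass that keeps a rolling window of the previous two characters and one signed balance (+1 at c,a,t; -1 at d,o,g), returning balance == 0.
import Mathlib
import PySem

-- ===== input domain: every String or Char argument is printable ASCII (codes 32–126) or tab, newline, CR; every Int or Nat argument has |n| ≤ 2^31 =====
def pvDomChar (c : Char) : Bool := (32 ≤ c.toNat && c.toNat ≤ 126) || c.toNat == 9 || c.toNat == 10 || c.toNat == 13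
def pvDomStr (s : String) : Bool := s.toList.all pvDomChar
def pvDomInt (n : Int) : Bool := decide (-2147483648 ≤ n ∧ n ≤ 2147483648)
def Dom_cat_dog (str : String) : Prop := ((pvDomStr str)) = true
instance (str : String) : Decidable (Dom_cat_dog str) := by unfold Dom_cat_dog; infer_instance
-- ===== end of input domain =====

-- B replaces A's slice-per-index loop with two counters by a single character stream keeping the previous two characters and one signed balance; measurably faster by a constant factor (no slice per position).

-- ===== PORT A =====
-- literal transliteration: catCount/dogCount accumulators, for i in range(len(str)-2), slice comparison
def cat_dog (str : String) : Bool :=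
  let s := str.toList
  let r := (PySem.List.pyRange 0 (PySem.Str.len str - 2) 1).foldl
    (fun (st : Int × Int) i =>
      if PySem.List.slice s (some i) (some (i + 3)) = "cat".toList then (st.1 + 1, st.2)
      else if PySem.List.slice s (some i) (some (i + 3)) = "dog".toList then (st.1, st.2 + 1)
      else st) (0, 0)
  r.1 == r.2

-- ===== PORT B =====
-- literal transliteration of Source B: state (p2, p1, bal), one pass over the characters
def cat_dog_alt (str : String) : Bool :=
  let st := str.toList.foldl
    (fun (st : Option Char × Option Char × Int) c =>
      let (p2, p1, bal) := st
      let bal' :=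
        if p2 = some 'c' ∧ p1 = some 'a' ∧ c = 't' then bal + 1
        else if p2 = some 'd' ∧ p1 = some 'o' ∧ c = 'g' then bal - 1
        else bal
      (p1, some c, bal'))
    (none, none, 0)
  st.2.2 == 0

-- ===== PRECONDITION & SPEC =====
def Spec_cat_dog (str : String) (out : Bool) : Prop := out = cat_dog_alt str
instance (str : String) (out : Bool) : Decidable (Spec_cat_dog str out) := by unfold Spec_cat_dog; infer_instance

-- ===== CLAIM (what is proved, stated in full; the proofs are below) =====
def Claim_equal_cat_dog : Prop := ∀ (str : String), Dom_cat_dog str → Spec_cat_dog str (cat_dog str)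

-- ===== LEMMAS AND PROOFS =====

-- number of positions j with sub a prefix of s.drop j (overlapping occurrence count)
def patOcc (sub : List Char) : List Char → Nat
  | [] => 0
  | c :: t => (if sub.isPrefixOf (c :: t) then 1 else 0) + patOcc sub t

lemma patOcc_eq_countP_range (sub : List Char) (s : List Char) :
    patOcc sub s = (List.range s.length).countP (fun j => sub.isPrefixOf (s.drop j)) := by
  induction s with
  | nil => simp [patOcc]
  | cons c t ih =>
    simp only [patOcc, List.length_cons, List.range_succ_eq_map, List.countP_cons,
      List.countP_map, List.drop_zero, ih]
    simp [Function.comp_def, Nat.add_comm]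

lemma countP_range_extend (m n : Nat) (P : Nat → Bool) (hmn : m ≤ n)
    (h : ∀ j, m ≤ j → P j = false) :
    (List.range n).countP P = (List.range m).countP P := by
  rw [show n = m + (n - m) by omega, List.range_add, List.countP_append]
  have : List.countP P (List.map (fun x => m + x) (List.range (n - m))) = 0 := by
    rw [List.countP_eq_zero]
    intro a ha
    obtain ⟨x, -, rfl⟩ := List.mem_map.mp ha
    simp [h (m + x) (Nat.le_add_right m x)]
  omega

-- the windowed predicate over range(len-2) counts exactly patOcc
lemma countP_window (sub : List Char) (hlen : sub.length = 3) (s : List Char) :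
    ((List.range ((s.length : Int) - 2).toNat).countP
      (fun (k : Nat) => decide (PySem.List.slice s (some (k : Int)) (some ((k : Int) + 3)) = sub)))
      = patOcc sub s := by
  have hpred : ∀ k : Nat,
      (decide (PySem.List.slice s (some (k : Int)) (some ((k : Int) + 3)) = sub))
        = sub.isPrefixOf (s.drop k) := by
    intro k
    have h1 : ((k : Int)).toNat = k := by omega
    have h2 : ((k : Int) + 3).toNat = k + 3 := by omega
    rw [PySem.List.slice_toNat s (by positivity) (by positivity), h1, h2,
        show k + 3 - k = 3 from by omega]
    cases hb : sub.isPrefixOf (List.drop k s) with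
    | true =>
      simp only [decide_eq_true_eq]
      rw [List.isPrefixOf_iff_prefix, List.prefix_iff_eq_take, hlen] at hb
      exact hb.symm
    | false =>
      simp only [decide_eq_false_iff_not]
      intro he
      have hnp : ¬ sub <+: List.drop k s := by
        simp [← List.isPrefixOf_iff_prefix, hb]
      rw [List.prefix_iff_eq_take, hlen] at hnp
      exact hnp he.symm
  rw [List.countP_congr (fun k _ => by rw [hpred k])]
  rw [patOcc_eq_countP_range]
  refine (countP_range_extend _ _ _ (by omega) ?_).symm
  intro j hj
  simp only [Bool.eq_false_iff, ne_eq, List.isPrefixOf_iff_prefix]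
  intro hpre
  have := hpre.length_le
  simp only [List.length_drop, hlen] at this
  omega

-- B's fold, as a recursive balance function on the remaining characters
def triBal (p2 p1 : Option Char) : List Char → Int
  | [] => 0
  | c :: t =>
      (if p2 = some 'c' ∧ p1 = some 'a' ∧ c = 't' then 1
       else if p2 = some 'd' ∧ p1 = some 'o' ∧ c = 'g' then -1
       else 0) + triBal p1 (some c) t

lemma foldl_eq_triBal (s : List Char) (p2 p1 : Option Char) (bal : Int) :
    (s.foldl
      (fun (st : Option Char × Option Char × Int) c =>
        let (p2, p1, bal) := st
        let bal' :=
          if p2 = some 'c' ∧ p1 = some 'a' ∧ c = 't' then bal + 1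
          else if p2 = some 'd' ∧ p1 = some 'o' ∧ c = 'g' then bal - 1
          else bal
        (p1, some c, bal'))
      (p2, p1, bal)).2.2 = bal + triBal p2 p1 s := by
  induction s generalizing p2 p1 bal with
  | nil => simp [triBal]
  | cons c t ih =>
    simp only [List.foldl_cons, triBal, ih]
    split_ifs <;> ring

lemma patOcc_cons (sub : List Char) (x : Char) (xs : List Char) :
    patOcc sub (x :: xs) = (if sub.isPrefixOf (x :: xs) then 1 else 0) + patOcc sub xs := rfl

lemma cat_prefix_iff (a b c : Char) (t : List Char) :
    ("cat".toList <+: (a :: b :: c :: t)) ↔ (a = 'c' ∧ b = 'a' ∧ c = 't') := by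
  show ('c' :: 'a' :: 't' :: ([] : List Char)) <+: _ ↔ _
  simp only [List.cons_prefix_cons, List.nil_prefix, and_true]
  constructor
  · rintro ⟨rfl, rfl, rfl⟩; exact ⟨rfl, rfl, rfl⟩
  · rintro ⟨rfl, rfl, rfl⟩; exact ⟨rfl, rfl, rfl⟩

lemma dog_prefix_iff (a b c : Char) (t : List Char) :
    ("dog".toList <+: (a :: b :: c :: t)) ↔ (a = 'd' ∧ b = 'o' ∧ c = 'g') := by
  show ('d' :: 'o' :: 'g' :: ([] : List Char)) <+: _ ↔ _
  simp only [List.cons_prefix_cons, List.nil_prefix, and_true]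
  constructor
  · rintro ⟨rfl, rfl, rfl⟩; exact ⟨rfl, rfl, rfl⟩
  · rintro ⟨rfl, rfl, rfl⟩; exact ⟨rfl, rfl, rfl⟩

lemma triBal_some_eq (s : List Char) : ∀ a b : Char,
    triBal (some a) (some b) s
      = (patOcc "cat".toList (a :: b :: s) : Int) - (patOcc "dog".toList (a :: b :: s) : Int) := by
  induction s with
  | nil =>
    intro a b
    simp only [triBal, patOcc]
    rw [if_neg (by rw [List.isPrefixOf_iff_prefix]; rintro ⟨r, hr⟩; simp at hr),
        if_neg (by rw [List.isPrefixOf_iff_prefix]; rintro ⟨r, hr⟩; simp at hr),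
        if_neg (by rw [List.isPrefixOf_iff_prefix]; rintro ⟨r, hr⟩; simp at hr),
        if_neg (by rw [List.isPrefixOf_iff_prefix]; rintro ⟨r, hr⟩; simp at hr)]
    simp
  | cons c t ih =>
    intro a b
    have hstep : triBal (some a) (some b) (c :: t)
        = (if (some a : Option Char) = some 'c' ∧ (some b : Option Char) = some 'a' ∧ c = 't' then 1
           else if (some a : Option Char) = some 'd' ∧ (some b : Option Char) = some 'o' ∧ c = 'g' then -1
           else 0) + triBal (some b) (some c) t := rfl
    rw [hstep, ih b c,
        patOcc_cons "cat".toList a (b :: c :: t), patOcc_cons "dog".toList a (b :: c :: t)]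
    simp only [Option.some.injEq, List.isPrefixOf_iff_prefix, cat_prefix_iff, dog_prefix_iff]
    by_cases hC : a = 'c' ∧ b = 'a' ∧ c = 't'
    · obtain ⟨rfl, rfl, rfl⟩ := hC
      simp; omega
    · by_cases hD : a = 'd' ∧ b = 'o' ∧ c = 'g'
      · obtain ⟨rfl, rfl, rfl⟩ := hD
        simp; omega
      · rw [if_neg hC, if_neg hC, if_neg hD, if_neg hD]
        push_cast; ring

lemma triBal_none_none (s : List Char) :
    triBal none none s = (patOcc "cat".toList s : Int) - (patOcc "dog".toList s : Int) := by
  match s with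
  | [] => simp [triBal, patOcc]
  | [c] =>
    simp only [triBal, patOcc]
    rw [if_neg (by rintro ⟨h, -⟩; cases h), if_neg (by rintro ⟨h, -⟩; cases h),
        if_neg (by rw [List.isPrefixOf_iff_prefix]; rintro ⟨r, hr⟩; simp at hr),
        if_neg (by rw [List.isPrefixOf_iff_prefix]; rintro ⟨r, hr⟩; simp at hr)]
    simp
  | a :: b :: t =>
    have h1 : triBal none none (a :: b :: t) = triBal (some a) (some b) t := by
      have e1 : triBal none none (a :: b :: t)
          = (if (none : Option Char) = some 'c' ∧ (none : Option Char) = some 'a' ∧ a = 't' then 1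
             else if (none : Option Char) = some 'd' ∧ (none : Option Char) = some 'o' ∧ a = 'g' then -1
             else 0) + triBal none (some a) (b :: t) := rfl
      have e2 : triBal none (some a) (b :: t)
          = (if (none : Option Char) = some 'c' ∧ (some a : Option Char) = some 'a' ∧ b = 't' then 1
             else if (none : Option Char) = some 'd' ∧ (some a : Option Char) = some 'o' ∧ b = 'g' then -1
             else 0) + triBal (some a) (some b) t := rfl
      rw [e1, e2,
          if_neg (by rintro ⟨h, -⟩; cases h), if_neg (by rintro ⟨h, -⟩; cases h),
          if_neg (by rintro ⟨h, -⟩; cases h), if_neg (by rintro ⟨h, -⟩; cases h)]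
      ring
    rw [h1, triBal_some_eq t a b]

-- ===== VERDICT (by name: the statement is the Claim_ definition above) =====
theorem cat_dog_spec : Claim_equal_cat_dog := by
  intro str _
  unfold Spec_cat_dog
  simp only [cat_dog, cat_dog_alt, PySem.Str.len_eq]
  generalize str.toList = s
  -- B side: fold = triBal = catOcc - dogOcc
  rw [foldl_eq_triBal, triBal_none_none]
  -- A side: split the paired fold into two counting folds
  rw [PySem.List.foldl_congr_mem
        (PySem.List.pyRange 0 ((s.length : Int) - 2))
        (fun (st : Int × Int) i =>
          if PySem.List.slice s (some i) (some (i + 3)) = "cat".toList then (st.1 + 1, st.2)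
          else if PySem.List.slice s (some i) (some (i + 3)) = "dog".toList then (st.1, st.2 + 1)
          else st)
        (fun (st : Int × Int) i =>
          (if PySem.List.slice s (some i) (some (i + 3)) = "cat".toList then st.1 + 1
           else if PySem.List.slice s (some i) (some (i + 3)) = "dog".toList then st.1 else st.1,
           if PySem.List.slice s (some i) (some (i + 3)) = "cat".toList then st.2
           else if PySem.List.slice s (some i) (some (i + 3)) = "dog".toList then st.2 + 1 else st.2))
        (0, 0)
        (fun st i _ => by dsimp only; split_ifs <;> simp)]
  rw [PySem.List.foldl_prod_mk
        (f := fun (c : Int) i =>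
          if PySem.List.slice s (some i) (some (i + 3)) = "cat".toList then c + 1
          else if PySem.List.slice s (some i) (some (i + 3)) = "dog".toList then c else c)
        (g := fun (d : Int) i =>
          if PySem.List.slice s (some i) (some (i + 3)) = "cat".toList then d
          else if PySem.List.slice s (some i) (some (i + 3)) = "dog".toList then d + 1 else d)]
  have hcatdog : ("cat".toList : List Char) ≠ "dog".toList := by decide
  have hf : ∀ (c : Int) (i : Int), i ∈ PySem.List.pyRange 0 ((s.length : Int) - 2) 1 →
      (if PySem.List.slice s (some i) (some (i + 3)) = "cat".toList then c + 1
       else if PySem.List.slice s (some i) (some (i + 3)) = "dog".toList then c else c)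
      = (if PySem.List.slice s (some i) (some (i + 3)) = "cat".toList then c + 1 else c) := by
    intro c i _; split_ifs <;> rfl
  have hg : ∀ (d : Int) (i : Int), i ∈ PySem.List.pyRange 0 ((s.length : Int) - 2) 1 →
      (if PySem.List.slice s (some i) (some (i + 3)) = "cat".toList then d
       else if PySem.List.slice s (some i) (some (i + 3)) = "dog".toList then d + 1 else d)
      = (if PySem.List.slice s (some i) (some (i + 3)) = "dog".toList then d + 1 else d) := by
    intro d i _
    by_cases h1 : PySem.List.slice s (some i) (some (i + 3)) = "cat".toList
    · rw [if_pos h1, if_neg (fun h2 => hcatdog (h1.symm.trans h2))]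
    · rw [if_neg h1]
  rw [PySem.List.foldl_congr_mem (PySem.List.pyRange 0 ((s.length : Int) - 2))
        (fun (c : Int) i =>
          if PySem.List.slice s (some i) (some (i + 3)) = "cat".toList then c + 1
          else if PySem.List.slice s (some i) (some (i + 3)) = "dog".toList then c else c)
        (fun (c : Int) i =>
          if PySem.List.slice s (some i) (some (i + 3)) = "cat".toList then c + 1 else c)
        0 hf,
      PySem.List.foldl_congr_mem (PySem.List.pyRange 0 ((s.length : Int) - 2))
        (fun (d : Int) i =>
          if PySem.List.slice s (some i) (some (i + 3)) = "cat".toList then d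
          else if PySem.List.slice s (some i) (some (i + 3)) = "dog".toList then d + 1 else d)
        (fun (d : Int) i =>
          if PySem.List.slice s (some i) (some (i + 3)) = "dog".toList then d + 1 else d)
        0 hg,
      PySem.List.foldl_ite_add_one, PySem.List.foldl_ite_add_one]
  -- each countP over pyRange is patOcc
  have hcount : ∀ sub : List Char, sub.length = 3 →
      (PySem.List.pyRange 0 ((s.length : Int) - 2) 1).countP
        (fun i => decide (PySem.List.slice s (some i) (some (i + 3)) = sub))
      = patOcc sub s := by
    intro sub hlen
    rw [PySem.List.pyRange_one, List.countP_map, ← countP_window sub hlen s]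
    simp only [sub_zero]
    apply List.countP_congr
    intro k _
    simp
  rw [hcount _ (by decide), hcount _ (by decide)]
  simp only [zero_add]
  rcases eq_or_ne (patOcc "cat".toList s) (patOcc "dog".toList s) with h | h
  · rw [h]; simp
  · rw [beq_eq_false_iff_ne.mpr (by exact_mod_cast h),
        beq_eq_false_iff_ne.mpr (by intro he; apply h; omega)]
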